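-- pv_equiv track=rewrite | github.com/Humansu1t/AOIS | lab5/kuain.py | get_normal_form
-- ===== SOURCE A (Python) =====
-- def get_normal_form(expr, is_sknf):
--     ch_1 = "*"
--     ch_2 = "+"
--     if is_sknf:
--         ch_1, ch_2 = ch_2, ch_1
--     expr = list(expr)
--     for i in range(len(expr)):
--         expr[i] = list(expr[i])
--     for i in range(len(expr)):
--         j = 0
--         while j < len(expr[i]) - 1:
--             if expr[i][j].isalpha() and expr[i][j + 1].isalpha():
--                 expr[i].insert(j + 1, ch_1)
--             elif expr[i][j + 1] == "!" and expr[i][j].isalpha():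
--                 expr[i].insert(j + 1, ch_1)
--             j += 1
--     for i in range(len(expr)):
--         expr[i] = "".join(expr[i])
--     result = "(" + f"){ch_2}(".join(expr) + ")"
--     return result
-- ===== SOURCE B (Python) =====
-- def get_normal_form(expr, is_sknf):
--     ch_1, ch_2 = ("+", "*") if is_sknf else ("*", "+")
--     def sep(t):
--         return "".join(c + ch_1 if c.isalpha() and (n.isalpha() or n == "!") else c
--                        for c, n in zip(t, t[1:])) + t[-1:]
--     return "(" + f"){ch_2}(".join(sep(t) for t in expr) + ")"
-- ===== Notes on version B (the rewrite author's own statement) =====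
-- stated objective: simpler
-- what changed: Replaces the index-tracked while loop with repeated in-place list.insert by a single pass over adjacent character pairs (zip(t, t[1:])) that builds each term string directly with no mutation.
import Mathlib
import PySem

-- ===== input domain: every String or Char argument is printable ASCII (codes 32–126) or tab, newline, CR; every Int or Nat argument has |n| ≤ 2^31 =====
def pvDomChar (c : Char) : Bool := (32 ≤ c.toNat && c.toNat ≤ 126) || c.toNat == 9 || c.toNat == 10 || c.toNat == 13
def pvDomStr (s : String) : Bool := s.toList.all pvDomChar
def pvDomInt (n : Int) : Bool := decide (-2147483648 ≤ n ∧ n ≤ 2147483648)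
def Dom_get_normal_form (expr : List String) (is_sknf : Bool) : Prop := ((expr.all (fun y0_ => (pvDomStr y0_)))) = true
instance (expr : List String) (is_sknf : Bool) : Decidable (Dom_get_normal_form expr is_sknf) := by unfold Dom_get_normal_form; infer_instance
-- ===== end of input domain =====

-- B replaces A's index-tracked while loop with repeated in-place list.insert by a single
-- pass over adjacent character pairs that builds each term directly (objective: simpler).

-- ===== PORT A =====
-- A's while loop mutates expr[i] in place (insert makes the list grow), so it is written
-- with fuel; 2*len+1 steps always suffice (shown in the proofs below, which never rely on
-- the fuel running out).  expr[i][j], always in range here, is ported as List.getD.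
def pvLoopA (fuel : Nat) (ch1 : Char) (l : List Char) (j : Nat) : List Char :=
  match fuel with
  | 0 => l
  | fuel + 1 =>
    if j < l.length - 1 then
      if PySem.Chars.isalpha (l.getD j ' ') && PySem.Chars.isalpha (l.getD (j + 1) ' ') then
        pvLoopA fuel ch1 (PySem.List.insert l ((j : Int) + 1) ch1) (j + 1)
      else if l.getD (j + 1) ' ' == '!' && PySem.Chars.isalpha (l.getD j ' ') then
        pvLoopA fuel ch1 (PySem.List.insert l ((j : Int) + 1) ch1) (j + 1)
      else
        pvLoopA fuel ch1 l (j + 1)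
    else l

def get_normal_form (expr : List String) (is_sknf : Bool) : String :=
  let ch1 := '*'
  let ch2 := '+'
  let (ch1, ch2) := if is_sknf then (ch2, ch1) else (ch1, ch2)
  let terms := expr.map (fun s => s.toList)          -- expr[i] = list(expr[i])
  let terms := terms.map (fun t => pvLoopA (2 * t.length + 1) ch1 t 0)
  String.ofList ('(' :: List.intercalate [')', ch2, '('] terms ++ [')'])

-- ===== PORT B =====
def get_normal_form_alt (expr : List String) (is_sknf : Bool) : String :=
  let (ch1, ch2) := if is_sknf then ('+', '*') else ('*', '+')
  let sep := fun (t : List Char) =>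
    ((t.zip (PySem.List.slice t (some 1) none)).flatMap
      (fun p => if PySem.Chars.isalpha p.1 && (PySem.Chars.isalpha p.2 || p.2 == '!')
                then [p.1, ch1] else [p.1]))
    ++ PySem.List.slice t (some (-1)) none           -- t[-1:]
  String.ofList ('(' :: List.intercalate [')', ch2, '('] (expr.map (fun s => sep s.toList)) ++ [')'])

-- ===== PRECONDITION & SPEC =====
def Spec_get_normal_form (expr : List String) (is_sknf : Bool) (out : String) : Prop := out = get_normal_form_alt expr is_sknf
instance (expr : List String) (is_sknf : Bool) (out : String) : Decidable (Spec_get_normal_form expr is_sknf out) := by unfold Spec_get_normal_form; infer_instance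

-- ===== CLAIM (what is proved, stated in full; the proofs are below) =====
def Claim_equal_get_normal_form : Prop := ∀ (expr : List String) (is_sknf : Bool), Dom_get_normal_form expr is_sknf → Spec_get_normal_form expr is_sknf (get_normal_form expr is_sknf)

-- ===== LEMMAS AND PROOFS =====

-- proof-side characterisation of one processed term
def pvPair (ch1 : Char) : List Char → List Char
  | [] => []
  | [c] => [c]
  | c :: n :: rs =>
    if PySem.Chars.isalpha c && (PySem.Chars.isalpha n || n == '!')
    then c :: ch1 :: pvPair ch1 (n :: rs)
    else c :: pvPair ch1 (n :: rs)

theorem pvLoopA_succ (fuel : Nat) (ch1 : Char) (l : List Char) (j : Nat) :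
    pvLoopA (fuel + 1) ch1 l j =
      if j < l.length - 1 then
        if PySem.Chars.isalpha (l.getD j ' ') && PySem.Chars.isalpha (l.getD (j + 1) ' ') then
          pvLoopA fuel ch1 (PySem.List.insert l ((j : Int) + 1) ch1) (j + 1)
        else if l.getD (j + 1) ' ' == '!' && PySem.Chars.isalpha (l.getD j ' ') then
          pvLoopA fuel ch1 (PySem.List.insert l ((j : Int) + 1) ch1) (j + 1)
        else
          pvLoopA fuel ch1 l (j + 1)
      else l := rfl

theorem pvLoopA_stop (fuel : Nat) (ch1 : Char) (l : List Char) (j : Nat)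
    (h : ¬ j < l.length - 1) : pvLoopA fuel ch1 l j = l := by
  cases fuel with
  | zero => rfl
  | succ f => rw [pvLoopA_succ, if_neg h]

theorem pvL1 (done : List Char) (x : Char) (rest : List Char) (d : Char) :
    (done ++ x :: rest).getD done.length d = x := by
  induction done with
  | nil => rfl
  | cons a t ih => simpa using ih

theorem pvL2 (done : List Char) (x y : Char) (rest : List Char) (d : Char) :
    (done ++ x :: y :: rest).getD (done.length + 1) d = y := by
  induction done with
  | nil => rfl
  | cons a t ih => simpa using ih

theorem pvL3 (done : List Char) (x y z : Char) (rest : List Char) (d : Char) :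
    (done ++ x :: y :: z :: rest).getD (done.length + 1 + 1) d = z := by
  induction done with
  | nil => rfl
  | cons a t ih => simpa using ih

theorem pvTake_append (done : List Char) (x : Char) (rs : List Char) :
    (done ++ x :: rs).take (done.length + 1) = done ++ [x] := by
  induction done with
  | nil => rfl
  | cons a t ih => simpa using ih

theorem pvDrop_append (done : List Char) (x : Char) (rs : List Char) :
    (done ++ x :: rs).drop (done.length + 1) = rs := by
  induction done with
  | nil => rfl
  | cons a t ih => simpa using ih

theorem pvInsert_mid (done : List Char) (c n ch1 : Char) (rs : List Char) :
    PySem.List.insert (done ++ c :: n :: rs) ((done.length : Int) + 1) ch1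
      = done ++ c :: ch1 :: n :: rs := by
  have hcast : ((done.length : Int) + 1) = ((done.length + 1 : Nat) : Int) := by push_cast; ring
  rw [hcast, PySem.List.insert_natCast _ _ _
    (by simp only [List.length_append, List.length_cons]; omega)]
  rw [pvTake_append, pvDrop_append]
  simp

-- loop invariant: with enough fuel, A's while loop on done ++ rest at position |done|
-- appends pvPair of the unprocessed suffix (ch1 is '*' or '+', never alphabetic)
theorem pvLoopA_inv (ch1 : Char) (h1 : PySem.Chars.isalpha ch1 = false) :
    ∀ fuel rest done, 2 * rest.length ≤ fuel →
      pvLoopA fuel ch1 (done ++ rest) done.length = done ++ pvPair ch1 rest := by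
  intro fuel
  induction fuel using Nat.strong_induction_on with
  | _ fuel ih =>
    intro rest done hfuel
    rcases rest with _ | ⟨c, _ | ⟨n, rs⟩⟩
    · rw [pvLoopA_stop _ _ _ _ (by simp only [List.append_nil]; omega)]
      simp [pvPair]
    · rw [pvLoopA_stop _ _ _ _
        (by simp only [List.length_append, List.length_cons, List.length_nil]; omega)]
      simp [pvPair]
    · have hlen : done.length < (done ++ c :: n :: rs).length - 1 := by
        simp only [List.length_append, List.length_cons]; omega
      by_cases hcond : (PySem.Chars.isalpha c && (PySem.Chars.isalpha n || n == '!')) = true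
      · -- insertion step, followed by a step that looks at (ch1, n) and never inserts
        obtain ⟨f, rfl⟩ : ∃ f, fuel = f + 1 + 1 :=
          ⟨fuel - 2, by simp only [List.length_cons] at hfuel; omega⟩
        have key : pvLoopA (f + 1) ch1 (done ++ c :: ch1 :: n :: rs) (done.length + 1)
            = done ++ c :: ch1 :: pvPair ch1 (n :: rs) := by
          rw [pvLoopA_succ,
            if_pos (by simp only [List.length_append, List.length_cons]; omega),
            pvL2, pvL3, if_neg (by simp [h1]), if_neg (by simp [h1])]
          have e : done ++ c :: ch1 :: n :: rs = (done ++ [c, ch1]) ++ n :: rs := by simp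
          have e2 : done.length + 1 + 1 = ((done ++ [c, ch1]) : List Char).length := by simp
          rw [e, e2, ih f (by omega) (n :: rs) (done ++ [c, ch1])
            (by simp only [List.length_cons] at hfuel ⊢; omega)]
          simp
        rw [pvLoopA_succ, if_pos hlen, pvL1, pvL2]
        by_cases h2 : (PySem.Chars.isalpha c && PySem.Chars.isalpha n) = true
        · rw [if_pos h2, pvInsert_mid, key]
          simp [pvPair, hcond]
        · have h3 : (n == '!' && PySem.Chars.isalpha c) = true := by
            rcases (Bool.and_eq_true _ _).mp hcond with ⟨hca, hor⟩
            rcases (Bool.or_eq_true _ _).mp hor with hna | hnb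
            · exact absurd (by simp [hca, hna]) h2
            · simp [hca, hnb]
          rw [if_neg h2, if_pos h3, pvInsert_mid, key]
          simp [pvPair, hcond]
      · -- no insertion
        obtain ⟨f, rfl⟩ : ∃ f, fuel = f + 1 :=
          ⟨fuel - 1, by simp only [List.length_cons] at hfuel; omega⟩
        have h2 : ¬ (PySem.Chars.isalpha c && PySem.Chars.isalpha n) = true := fun hx =>
          hcond (by rcases (Bool.and_eq_true _ _).mp hx with ⟨ha, hb⟩; simp [ha, hb])
        have h3 : ¬ (n == '!' && PySem.Chars.isalpha c) = true := fun hx =>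
          hcond (by rcases (Bool.and_eq_true _ _).mp hx with ⟨ha, hb⟩; simp [ha, hb])
        rw [pvLoopA_succ, if_pos hlen, pvL1, pvL2, if_neg h2, if_neg h3]
        have e : done ++ c :: n :: rs = (done ++ [c]) ++ n :: rs := by simp
        have e2 : done.length + 1 = ((done ++ [c]) : List Char).length := by simp
        rw [e, e2, ih f (by omega) (n :: rs) (done ++ [c])
          (by simp only [List.length_cons] at hfuel ⊢; omega)]
        have hp : pvPair ch1 (c :: n :: rs) = c :: pvPair ch1 (n :: rs) := by
          simp [pvPair, hcond]
        rw [hp]; simp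

-- B's zip/flatMap pass plus t[-1:] equals pvPair
theorem pvAlt_eq_pvPair (ch1 : Char) (t : List Char) :
    ((t.zip (PySem.List.slice t (some 1) none)).flatMap
      (fun p => if PySem.Chars.isalpha p.1 && (PySem.Chars.isalpha p.2 || p.2 == '!')
                then [p.1, ch1] else [p.1]))
    ++ PySem.List.slice t (some (-1)) none = pvPair ch1 t := by
  induction t with
  | nil => rw [PySem.List.slice_from_one, PySem.List.slice_from_neg_one]; simp [pvPair]
  | cons c t ih =>
    cases t with
    | nil => rw [PySem.List.slice_from_one, PySem.List.slice_from_neg_one]; simp [pvPair]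
    | cons n rs =>
      rw [PySem.List.slice_from_one, PySem.List.slice_from_neg_one] at ih ⊢
      simp only [List.tail_cons, List.zip_cons_cons, List.flatMap_cons, List.length_cons,
        Nat.add_sub_cancel, List.drop_succ_cons] at ih ⊢
      rw [List.append_assoc, ih]
      by_cases h : (PySem.Chars.isalpha c && (PySem.Chars.isalpha n || n == '!')) = true <;>
        simp [pvPair, h]

-- per-term equality: A's while loop (with its always-sufficient fuel) equals pvPair
theorem pvTerm_eq (ch1 : Char) (h1 : PySem.Chars.isalpha ch1 = false) (t : List Char) :
    pvLoopA (2 * t.length + 1) ch1 t 0 = pvPair ch1 t := by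
  simpa using pvLoopA_inv ch1 h1 (2 * t.length + 1) t [] (by omega)

theorem pvTerm_alt (ch1 : Char) (h1 : PySem.Chars.isalpha ch1 = false) (t : List Char) :
    pvLoopA (2 * t.length + 1) ch1 t 0
      = ((t.zip (PySem.List.slice t (some 1) none)).flatMap
          (fun p => if PySem.Chars.isalpha p.1 && (PySem.Chars.isalpha p.2 || p.2 == '!')
                    then [p.1, ch1] else [p.1]))
        ++ PySem.List.slice t (some (-1)) none := by
  rw [pvTerm_eq ch1 h1, pvAlt_eq_pvPair]

-- ===== VERDICT (by name: the statement is the Claim_ definition above) =====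
theorem get_normal_form_spec : Claim_equal_get_normal_form := by
  intro expr is_sknf _
  unfold Spec_get_normal_form
  cases is_sknf <;>
    simp only [get_normal_form, get_normal_form_alt, Bool.false_eq_true, if_false, if_true,
      pvTerm_alt '+' (by decide), pvTerm_alt '*' (by decide), List.map_map, Function.comp_def]
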